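-- pv_equiv track=rewrite | github.com/sunni546/algorithm-study | baekjoon/python/실버/4659.py | has_three_consecutive_gather_or_consonant
-- ===== SOURCE A (Python) =====
-- def is_gather(c):
--     if c in ['a', 'e', 'i', 'o', 'u']:
--         return True
--
--     return False
--
-- def has_three_consecutive_gather_or_consonant(s):
--     if len(s) < 3:
--         return False
--
--     for i in range(2, len(s)):
--         if is_gather(s[i - 2]) and is_gather(s[i - 1]) and is_gather(s[i]):
--             return True
--         elif not is_gather(s[i - 2]) and not is_gather(s[i - 1]) and not is_gather(s[i]):
--             return True
--
--     return False
-- ===== SOURCE B (Python) =====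
-- def is_gather(c):
--     if c in ['a', 'e', 'i', 'o', 'u']:
--         return True
--     return False
--
-- def has_three_consecutive_gather_or_consonant(s):
--     prev = None
--     count = 0
--     for c in s:
--         cls = is_gather(c)
--         count = count + 1 if cls == prev else 1
--         if count >= 3:
--             return True
--         prev = cls
--     return False
-- ===== Notes on version B (the rewrite author's own statement) =====
-- stated objective: alternative
-- what changed: Replaces the three-absolute-index window re-check per position with a single streak counter over character classes (increment on same class as previous char, reset to 1 otherwise, return True when the streak reaches 3).
import Mathlib
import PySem

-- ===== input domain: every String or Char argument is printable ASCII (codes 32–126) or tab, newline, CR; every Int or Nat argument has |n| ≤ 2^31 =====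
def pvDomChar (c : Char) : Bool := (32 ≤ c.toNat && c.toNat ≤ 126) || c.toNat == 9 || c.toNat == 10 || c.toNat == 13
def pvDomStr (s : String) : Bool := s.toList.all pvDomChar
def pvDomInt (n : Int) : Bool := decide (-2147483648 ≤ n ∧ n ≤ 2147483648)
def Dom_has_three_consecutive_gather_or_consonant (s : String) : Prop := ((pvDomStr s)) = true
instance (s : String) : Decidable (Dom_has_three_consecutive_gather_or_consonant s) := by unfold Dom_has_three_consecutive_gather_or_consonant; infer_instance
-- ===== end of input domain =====

-- B replaces A's per-position three-index window re-check by a single running streak counter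
-- over character classes (objective: alternative decomposition, same O(n) cost).

-- ===== PORT A =====
-- is_gather: True iff c is one of the five lowercase vowels
def isGather (c : Char) : Bool :=
  if c ∈ ['a', 'e', 'i', 'o', 'u'] then true else false

-- the 'for i in range(2, len(s))' loop with early return, as structural recursion on i
def aLoop (cs : List Char) (i : Nat) : Bool :=
  if i < cs.length then
    if isGather cs[i-2]! && isGather cs[i-1]! && isGather cs[i]! then true
    else if !isGather cs[i-2]! && !isGather cs[i-1]! && !isGather cs[i]! then true
    else aLoop cs (i+1)
  else false
termination_by cs.length - i

def has_three_consecutive_gather_or_consonant (s : String) : Bool :=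
  if s.toList.length < 3 then false else aLoop s.toList 2

-- ===== PORT B =====
-- the streak loop: prev = class of previous char (none before the first), count = current streak
def bLoop (cs : List Char) (prev : Option Bool) (count : Nat) : Bool :=
  match cs with
  | [] => false
  | c :: rest =>
    let cls := isGather c
    let count' := if some cls == prev then count + 1 else 1
    if count' ≥ 3 then true else bLoop rest (some cls) count'

def has_three_consecutive_gather_or_consonant_alt (s : String) : Bool :=
  bLoop s.toList none 0

-- ===== PRECONDITION & SPEC =====
def Spec_has_three_consecutive_gather_or_consonant (s : String) (out : Bool) : Prop := out = has_three_consecutive_gather_or_consonant_alt s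
instance (s : String) (out : Bool) : Decidable (Spec_has_three_consecutive_gather_or_consonant s out) := by unfold Spec_has_three_consecutive_gather_or_consonant; infer_instance

-- ===== CLAIM (what is proved, stated in full; the proofs are below) =====
def Claim_equal_has_three_consecutive_gather_or_consonant : Prop := ∀ (s : String), Dom_has_three_consecutive_gather_or_consonant s → Spec_has_three_consecutive_gather_or_consonant s (has_three_consecutive_gather_or_consonant s)

-- ===== LEMMAS AND PROOFS =====

-- reference function both ports are reduced to: is there a window of three equal classes?
def tri2 : List Bool → Bool
  | a :: b :: c :: r => if a == b && b == c then true else tri2 (b :: c :: r)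
  | _ => false

theorem tri2_short (l : List Bool) (h : l.length < 3) : tri2 l = false := by
  match l with
  | [] => rfl
  | [_] => rfl
  | [_, _] => rfl
  | _ :: _ :: _ :: _ => simp only [List.length_cons] at h; omega

theorem tri2_drop_head (a b : Bool) (r : List Bool) (h : a ≠ b) :
    tri2 (a :: b :: r) = tri2 (b :: r) := by
  match r with
  | [] => simp [tri2]
  | c :: r' => simp [tri2, h]

-- one unfolding step of B's loop, same class as prev
theorem bLoop_cons_same (c : Char) (rest : List Char) (b : Bool) (n : Nat)
    (h : isGather c = b) :
    bLoop (c :: rest) (some b) n = if n + 1 ≥ 3 then true else bLoop rest (some b) (n+1) := by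
  simp [bLoop, h]

-- one unfolding step of B's loop, class differs from prev (or no prev)
theorem bLoop_cons_diff (c : Char) (rest : List Char) (p : Option Bool)  (n : Nat)
    (h : (some (isGather c) == p) = false) :
    bLoop (c :: rest) p n = bLoop rest (some (isGather c)) 1 := by
  simp [bLoop, h]

-- B's loop computed: from state (some b, 1) it is tri2 with one pending b,
-- from (some b, n+2) it is tri2 with two pending b's.
theorem bLoop_tri2 (cs : List Char) :
    (∀ b : Bool, bLoop cs (some b) 1 = tri2 (b :: cs.map isGather)) ∧
    (∀ (b : Bool) (n : Nat), bLoop cs (some b) (n+2) = tri2 (b :: b :: cs.map isGather)) := by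
  induction cs with
  | nil => exact ⟨fun b => rfl, fun b n => by simp [bLoop, tri2]⟩
  | cons c rest ih =>
    constructor
    · intro b
      by_cases h : isGather c = b
      · rw [bLoop_cons_same c rest b 1 h, if_neg (by omega), ih.2 b 0, List.map_cons, h]
      · rw [bLoop_cons_diff c rest (some b) 1 (by simp [h]), ih.1 (isGather c), List.map_cons,
          tri2_drop_head b (isGather c) _ (Ne.symm h)]
    · intro b n
      by_cases h : isGather c = b
      · rw [bLoop_cons_same c rest b (n+2) h, if_pos (by omega), List.map_cons, h]
        simp [tri2]
      · rw [bLoop_cons_diff c rest (some b) (n+2) (by simp [h]), ih.1 (isGather c), List.map_cons]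
        have h2 : tri2 (b :: b :: isGather c :: rest.map isGather)
            = tri2 (b :: isGather c :: rest.map isGather) := by
          simp [tri2, Ne.symm h]
        rw [h2, tri2_drop_head b (isGather c) _ (Ne.symm h)]

theorem alt_eq_tri2 (s : String) :
    has_three_consecutive_gather_or_consonant_alt s = tri2 (s.toList.map isGather) := by
  unfold has_three_consecutive_gather_or_consonant_alt
  match h : s.toList with
  | [] => rfl
  | c :: rest =>
    rw [bLoop_cons_diff c rest none 0 (by simp), (bLoop_tri2 rest).1 (isGather c), List.map_cons]

-- the triple-and / triple-not-and condition is the equal-classes condition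
theorem cond_eq (a b c : Bool) :
    ((a && b && c) || (!a && !b && !c)) = (a == b && b == c) := by
  cases a <;> cases b <;> cases c <;> rfl

-- A's loop computed: starting at index i (i ≥ 2) it is tri2 of the classes from i-2 on.
theorem aLoop_tri2 (cs : List Char) (i : Nat) (h2 : 2 ≤ i) :
    aLoop cs i = tri2 ((cs.drop (i-2)).map isGather) := by
  by_cases h : i < cs.length
  · have hi2 : i - 2 < cs.length := by omega
    have hi1 : i - 1 < cs.length := by omega
    have e2 : i - 2 + 1 = i - 1 := by omega
    have e1 : i - 1 + 1 = i := by omega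
    have hd : cs.drop (i-2) = cs[i-2] :: cs[i-1] :: cs[i] :: cs.drop (i+1) := by
      rw [List.drop_eq_getElem_cons hi2, e2, List.drop_eq_getElem_cons hi1, e1,
        List.drop_eq_getElem_cons h]
    rw [aLoop, if_pos h, hd]
    simp only [List.map_cons]
    rw [getElem!_pos cs (i-2) hi2, getElem!_pos cs (i-1) hi1, getElem!_pos cs i h]
    have hcnd := cond_eq (isGather cs[i-2]) (isGather cs[i-1]) (isGather cs[i])
    by_cases hc : (isGather cs[i-2] == isGather cs[i-1] && (isGather cs[i-1] == isGather cs[i])) = true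
    · cases hA : isGather cs[i-2] && isGather cs[i-1] && isGather cs[i]
      · have hB : (!isGather cs[i-2] && !isGather cs[i-1] && !isGather cs[i]) = true := by
          rw [hA] at hcnd; simpa [hc] using hcnd.symm
        simp [hB, tri2, hc]
      · simp [tri2, hc]
    · have hA : (isGather cs[i-2] && isGather cs[i-1] && isGather cs[i]) = false := by
        cases hx : isGather cs[i-2] && isGather cs[i-1] && isGather cs[i] <;> simp_all
      have hB : (!isGather cs[i-2] && !isGather cs[i-1] && !isGather cs[i]) = false := by
        cases hx : !isGather cs[i-2] && !isGather cs[i-1] && !isGather cs[i] <;> simp_all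
      rw [hA, hB]
      simp only [Bool.false_eq_true, if_false]
      rw [aLoop_tri2 cs (i+1) (by omega)]
      have hd' : cs.drop (i+1-2) = cs[i-1] :: cs[i] :: cs.drop (i+1) := by
        have e3 : i + 1 - 2 = i - 1 := by omega
        rw [e3, List.drop_eq_getElem_cons hi1, e1, List.drop_eq_getElem_cons h]
      rw [hd']
      simp only [List.map_cons, tri2]
      rw [if_neg (by simpa using hc)]
  · rw [aLoop, if_neg h]
    have hlen : ((cs.drop (i-2)).map isGather).length < 3 := by
      simp only [List.length_map, List.length_drop]; omega
    exact (tri2_short _ hlen).symm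
termination_by cs.length - i

-- ===== VERDICT (by name: the statement is the Claim_ definition above) =====
theorem has_three_consecutive_gather_or_consonant_spec : Claim_equal_has_three_consecutive_gather_or_consonant := by
  intro s _
  unfold Spec_has_three_consecutive_gather_or_consonant
  unfold has_three_consecutive_gather_or_consonant
  rw [alt_eq_tri2]
  by_cases h : s.toList.length < 3
  · rw [if_pos h, tri2_short _ (by simpa using h)]
  · rw [if_neg h, aLoop_tri2 s.toList 2 (le_refl 2)]
    rfl
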